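-- pv_equiv track=rewrite | github.com/Erico-droid/Ace-Of-Face-And-Hair | server/Projects/views.py | find_png
-- ===== SOURCE A (Python) =====
-- def find_png(string):
--     index = 0
--     for i in range(len(string)):
--         if ('.' == string[i]):
--             index = i
--     arr = ''
--     for i in range(len(string)):
--         if i < index:
--             arr += string[i]
--     return arr
-- ===== SOURCE B (Python) =====
-- def find_png(string):
--     return '.'.join(string.split('.')[:-1])
-- ===== Notes on version B (the rewrite author's own statement) =====
-- stated objective: idiomatic
-- what changed: Replaces A's two index loops (scan for the last dot's index, then rebuild the prefix character by character) with a tokenize-and-reassemble one-liner: split on the separator, drop the last token, rejoin.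
import Mathlib
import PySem

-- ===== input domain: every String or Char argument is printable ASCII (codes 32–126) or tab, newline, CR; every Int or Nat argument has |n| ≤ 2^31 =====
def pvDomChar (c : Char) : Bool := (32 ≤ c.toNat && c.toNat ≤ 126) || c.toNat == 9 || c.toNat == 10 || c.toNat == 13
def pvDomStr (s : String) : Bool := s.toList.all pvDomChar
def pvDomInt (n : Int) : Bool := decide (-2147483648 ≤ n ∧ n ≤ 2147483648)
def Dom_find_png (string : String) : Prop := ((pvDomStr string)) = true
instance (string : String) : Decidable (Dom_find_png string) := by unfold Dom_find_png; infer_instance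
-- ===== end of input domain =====

-- B replaces A's two index loops (find last-dot index, rebuild prefix char by char)
-- with split-on-'.'/drop-last/rejoin; proved to return the same string on all inputs.


-- ===== PORT A =====
def find_png (string : String) : String :=
  let s := string.toList
  let index : Int := (PySem.List.pyRange 0 s.length 1).foldl
    (fun index i => if PySem.List.pyGetD s i ' ' = '.' then i else index) 0
  let arr := (PySem.List.pyRange 0 s.length 1).foldl
    (fun arr i => if i < index then arr ++ [PySem.List.pyGetD s i ' '] else arr) ([] : List Char)
  String.ofList arr

-- ===== PORT B =====
def find_png_alt (string : String) : String :=
  String.ofList (PySem.Chars.join ['.']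
    (PySem.List.slice (PySem.Chars.splitOn string.toList ['.']) none (some (-1))))

-- ===== PRECONDITION & SPEC =====
def Spec_find_png (string : String) (out : String) : Prop := out = find_png_alt string
instance (string : String) (out : String) : Decidable (Spec_find_png string out) := by unfold Spec_find_png; infer_instance

-- ===== CLAIM (what is proved, stated in full; the proofs are below) =====
def Claim_equal_find_png : Prop := ∀ (string : String), Dom_find_png string → Spec_find_png string (find_png string)

-- ===== LEMMAS AND PROOFS =====

/-- Structural form of `str.split('.')` on char lists. -/
def pvS : List Char → List (List Char)
  | [] => [[]]
  | c :: r => if c = '.' then [] :: pvS r else (pvS r).modifyHead (c :: ·)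

/-- The common value of both programs: the prefix before the last dot ([] if none). -/
def pvF : List Char → List Char
  | [] => []
  | c :: r => if '.' ∈ r then c :: pvF r else []

/-- Index of the last dot (0 if absent), defined from the left. -/
def pvLD : List Char → Nat
  | [] => 0
  | _ :: r => if '.' ∈ r then pvLD r + 1 else 0

/-- A's first loop after n iterations. -/
def pvIA (s : List Char) : Nat → Int
  | 0 => 0
  | n + 1 => if s.getD n ' ' = '.' then (n : Int) else pvIA s n

theorem pv_go_cons (fuel : Nat) (c : Char) (rest cur : List Char) (acc : List (List Char)) :
    PySem.Chars.splitOn.go ['.'] (fuel + 1) (c :: rest) cur acc =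
      if c = '.' then PySem.Chars.splitOn.go ['.'] fuel rest [] (cur.reverse :: acc)
      else PySem.Chars.splitOn.go ['.'] fuel rest (c :: cur) acc := by
  rw [PySem.Chars.splitOn.go]
  simp only [List.isPrefixOf, Bool.and_eq_true, beq_iff_eq, and_true]
  by_cases hc : c = '.'
  · simp [hc]
  · have hne : ¬ ('.' = c) := fun h => hc h.symm
    simp [hc, hne]

theorem pv_go_nil (fuel : Nat) (cur : List Char) (acc : List (List Char)) :
    PySem.Chars.splitOn.go ['.'] (fuel + 1) [] cur acc = (cur.reverse :: acc).reverse := by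
  rw [PySem.Chars.splitOn.go]
  intro h
  exact absurd h (Nat.succ_ne_zero fuel)

theorem pv_go_spec (fuel : Nat) : ∀ (l cur : List Char) (acc : List (List Char)),
    l.length < fuel →
    PySem.Chars.splitOn.go ['.'] fuel l cur acc =
      acc.reverse ++ (pvS l).modifyHead (cur.reverse ++ ·) := by
  induction fuel with
  | zero => intro l cur acc h; omega
  | succ f ih =>
    intro l cur acc h
    cases l with
    | nil => rw [pv_go_nil]; simp [pvS]
    | cons c rest =>
      rw [pv_go_cons]
      by_cases hc : c = '.'
      · rw [if_pos hc, ih rest [] (cur.reverse :: acc) (by simpa using Nat.lt_of_succ_lt_succ h)]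
        simp only [pvS, if_pos hc]
        cases pvS rest with
        | nil => simp
        | cons y ys => simp
      · rw [if_neg hc, ih rest (c :: cur) acc (by simpa using Nat.lt_of_succ_lt_succ h)]
        simp only [pvS, if_neg hc]
        cases pvS rest with
        | nil => simp
        | cons y ys => simp

theorem pv_splitOn_eq (l : List Char) : PySem.Chars.splitOn l ['.'] = pvS l := by
  unfold PySem.Chars.splitOn
  rw [pv_go_spec (l.length + 1) l [] [] (by omega)]
  cases h : pvS l with
  | nil => simp
  | cons y ys => simp

theorem pvS_ne_nil (l : List Char) : pvS l ≠ [] := by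
  induction l with
  | nil => simp [pvS]
  | cons c r ih =>
    simp only [pvS]
    split
    · simp
    · cases h : pvS r with
      | nil => exact absurd h ih
      | cons y ys => simp

theorem pvS_len (l : List Char) : 1 < (pvS l).length ↔ '.' ∈ l := by
  induction l with
  | nil => simp [pvS]
  | cons c r ih =>
    by_cases hc : c = '.'
    · have h1 : pvS (c :: r) = [] :: pvS r := by simp only [pvS, if_pos hc]
      rw [h1]
      simp only [List.length_cons, List.mem_cons]
      constructor
      · intro _; left; exact hc.symm
      · intro _
        have := List.length_pos_iff.mpr (pvS_ne_nil r)
        omega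
    · have h1 : pvS (c :: r) = (pvS r).modifyHead (c :: ·) := by simp only [pvS, if_neg hc]
      rw [h1, List.length_modifyHead, ih]
      have hne : ¬ ('.' = c) := fun h => hc h.symm
      simp [List.mem_cons, hne]

theorem pv_join_shift (qs : List (List Char)) (a y : List Char) :
    PySem.Chars.join ['.'] ((a ++ y) :: qs) = a ++ PySem.Chars.join ['.'] (y :: qs) := by
  cases qs with
  | nil => rw [PySem.Chars.join_singleton, PySem.Chars.join_singleton]
  | cons q qs' =>
    rw [PySem.Chars.join_cons_cons, PySem.Chars.join_cons_cons]
    simp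

theorem pv_J_eq (l : List Char) :
    PySem.Chars.join ['.'] ((pvS l).dropLast) = pvF l := by
  induction l with
  | nil => simp [pvS, pvF, PySem.Chars.join_nil]
  | cons c r ih =>
    obtain ⟨y, ys, hy⟩ : ∃ y ys, pvS r = y :: ys := by
      cases h : pvS r with
      | nil => exact absurd h (pvS_ne_nil r)
      | cons y ys => exact ⟨y, ys, rfl⟩
    by_cases hm : '.' ∈ r
    · have h2 : 1 < (pvS r).length := (pvS_len r).mpr hm
      obtain ⟨z, zs, hz⟩ : ∃ z zs, ys = z :: zs := by
        cases ys with
        | nil => rw [hy] at h2; simp at h2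
        | cons z zs => exact ⟨z, zs, rfl⟩
      subst hz
      have hdl : (pvS r).dropLast = y :: (z :: zs).dropLast := by rw [hy]; rfl
      by_cases hc : c = '.'
      · have h1 : pvS (c :: r) = [] :: y :: z :: zs := by simp only [pvS, if_pos hc, hy]
        rw [h1]
        have hd2 : ([] :: y :: z :: zs : List (List Char)).dropLast
            = [] :: y :: (z :: zs).dropLast := rfl
        rw [hd2, PySem.Chars.join_cons_cons, ← hdl, ih]
        simp [pvF, hm, hc]
      · have h1 : pvS (c :: r) = (c :: y) :: z :: zs := by
          simp only [pvS, if_neg hc, hy, List.modifyHead]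
        rw [h1]
        have hd2 : ((c :: y) :: z :: zs : List (List Char)).dropLast
            = (c :: y) :: (z :: zs).dropLast := rfl
        rw [hd2, show (c :: y) = [c] ++ y from rfl, pv_join_shift, ← hdl, ih]
        simp [pvF, hm]
    · have h1 : ¬ 1 < (pvS r).length := by rw [pvS_len]; exact hm
      have hys : ys = [] := by
        cases ys with
        | nil => rfl
        | cons z zs => rw [hy] at h1; simp at h1
      subst hys
      by_cases hc : c = '.'
      · have h1 : pvS (c :: r) = [[], y] := by simp only [pvS, if_pos hc, hy]
        rw [h1]
        have hd2 : ([[], y] : List (List Char)).dropLast = [[]] := rfl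
        rw [hd2, PySem.Chars.join_singleton]
        simp [pvF, hm]
      · have h1 : pvS (c :: r) = [c :: y] := by
          simp only [pvS, if_neg hc, hy, List.modifyHead]
        rw [h1]
        have hd2 : ([c :: y] : List (List Char)).dropLast = [] := rfl
        rw [hd2, PySem.Chars.join_nil]
        simp [pvF, hm]

theorem pv_foldA (s : List Char) (n : Nat) :
    (PySem.List.pyRange 0 n 1).foldl
      (fun index i => if PySem.List.pyGetD s i ' ' = '.' then i else index) 0 = pvIA s n := by
  induction n with
  | zero =>
    rw [show ((0 : Nat) : Int) = 0 from rfl, PySem.List.pyRange_one_eq_nil le_rfl]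
    rfl
  | succ m ih =>
    rw [show ((m + 1 : Nat) : Int) = (m : Int) + 1 by push_cast; ring,
      PySem.List.pyRange_one_succ_right (by positivity), List.foldl_append, ih]
    simp [pvIA]

theorem pvIA_nonneg (s : List Char) (n : Nat) : 0 ≤ pvIA s n := by
  induction n with
  | zero => simp [pvIA]
  | succ m ih => simp only [pvIA]; split <;> omega

theorem pvIA_le (s : List Char) (n : Nat) : pvIA s n ≤ n := by
  induction n with
  | zero => simp [pvIA]
  | succ m ih => simp only [pvIA]; split <;> [omega; omega]

theorem pv_foldArr (s : List Char) (idx : Int) (h0 : 0 ≤ idx) :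
    ∀ n : Nat, n ≤ s.length →
    (PySem.List.pyRange 0 n 1).foldl
      (fun arr i => if i < idx then arr ++ [PySem.List.pyGetD s i ' '] else arr) ([] : List Char)
      = s.take (min idx.toNat n) := by
  intro n
  induction n with
  | zero =>
    intro _
    rw [show ((0 : Nat) : Int) = 0 from rfl, PySem.List.pyRange_one_eq_nil le_rfl]
    simp
  | succ m ih =>
    intro hm
    rw [show ((m + 1 : Nat) : Int) = (m : Int) + 1 by push_cast; ring,
      PySem.List.pyRange_one_succ_right (by positivity), List.foldl_append, ih (by omega)]
    simp only [List.foldl_cons, List.foldl_nil]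
    by_cases hlt : (m : Int) < idx
    · rw [if_pos hlt]
      have hmlen : m < s.length := by omega
      have hmin1 : min idx.toNat m = m := by omega
      have hmin2 : min idx.toNat (m + 1) = m + 1 := by omega
      rw [hmin1, hmin2, PySem.List.pyGetD_natCast, List.take_add_one]
      have hsome : s[m]? = some s[m] := List.getElem?_eq_getElem hmlen
      simp [List.getD, hsome]
    · rw [if_neg hlt]
      have : min idx.toNat m = min idx.toNat (m + 1) := by omega
      rw [this]

theorem pvIA_append (t : List Char) (c : Char) :
    ∀ n : Nat, n ≤ t.length → pvIA (t ++ [c]) n = pvIA t n := by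
  intro n
  induction n with
  | zero => intro _; rfl
  | succ m ih =>
    intro hm
    have hg : (t ++ [c]).getD m ' ' = t.getD m ' ' := by
      have hm' : m < t.length := by omega
      simp [List.getD, List.getElem?_append_left hm']
    simp only [pvIA, hg, ih (by omega)]

theorem pvLD_append_dot (t : List Char) : pvLD (t ++ ['.']) = t.length := by
  induction t with
  | nil => simp [pvLD]
  | cons d t' ih => simp [pvLD, ih]

theorem pvLD_append_ne (t : List Char) (c : Char) (hc : c ≠ '.') :
    pvLD (t ++ [c]) = pvLD t := by
  induction t with
  | nil => simp [pvLD]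
  | cons d t' ih =>
    simp only [List.cons_append, pvLD, ih]
    have hmem : ('.' ∈ t' ++ [c]) ↔ '.' ∈ t' := by simp [Ne.symm hc]
    simp only [hmem]

theorem pvIA_eq_LD (s : List Char) : pvIA s s.length = (pvLD s : Int) := by
  induction s using List.reverseRecOn with
  | nil => simp [pvIA, pvLD]
  | append_singleton t c ih =>
    have hlen : (t ++ [c]).length = t.length + 1 := by simp
    rw [hlen]
    have hg : (t ++ [c]).getD t.length ' ' = c := by
      simp [List.getD]
    simp only [pvIA, hg]
    by_cases hc : c = '.'
    · subst hc; rw [if_pos rfl, pvLD_append_dot]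
    · rw [if_neg hc, pvIA_append t c t.length (le_refl _), ih, pvLD_append_ne t c hc]

theorem pv_take_LD (l : List Char) : l.take (pvLD l) = pvF l := by
  induction l with
  | nil => rfl
  | cons c r ih =>
    simp only [pvLD, pvF]
    by_cases hm : '.' ∈ r
    · rw [if_pos hm, if_pos hm, List.take_succ_cons, ih]
    · rw [if_neg hm, if_neg hm, List.take_zero]

-- ===== VERDICT (by name: the statement is the Claim_ definition above) =====
theorem find_png_spec : Claim_equal_find_png := by
  unfold Claim_equal_find_png Spec_find_png
  intro string _
  show String.ofList
      ((PySem.List.pyRange 0 string.toList.length 1).foldl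
        (fun arr i => if i <
            (PySem.List.pyRange 0 string.toList.length 1).foldl
              (fun index i => if PySem.List.pyGetD string.toList i ' ' = '.' then i else index) 0
          then arr ++ [PySem.List.pyGetD string.toList i ' '] else arr) ([] : List Char))
    = String.ofList (PySem.Chars.join ['.']
        (PySem.List.slice (PySem.Chars.splitOn string.toList ['.']) none (some (-1))))
  rw [PySem.List.slice_to_neg_one, pv_splitOn_eq, pv_J_eq, pv_foldA,
    pv_foldArr string.toList _ (pvIA_nonneg string.toList string.toList.length)
      string.toList.length (le_refl _)]
  have hle : (pvIA string.toList string.toList.length).toNat ≤ string.toList.length := by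
    have h1 := pvIA_le string.toList string.toList.length
    have h2 := pvIA_nonneg string.toList string.toList.length
    omega
  have hmin : min (pvIA string.toList string.toList.length).toNat string.toList.length
      = (pvIA string.toList string.toList.length).toNat := by omega
  rw [hmin, pvIA_eq_LD, Int.toNat_natCast, pv_take_LD]
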